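-- pv_equiv track=rewrite | github.com/beans365/modexp | src/model/modexp.py | iter_mult
-- ===== SOURCE A (Python) =====
-- def iter_mult(i, j, bitlen):
--     n = i
--     r = 0
--     for bit in range(bitlen):
--         if (j & (1 << bit)):
--             r = (r + n) % 2**bitlen
--         n = (n + n) % 2**bitlen
--     return r
-- ===== SOURCE B (Python) =====
-- def iter_mult(i, j, bitlen):
--     return (i * j) % (1 << bitlen)
-- ===== Notes on version B (the rewrite author's own statement) =====
-- stated objective: faster
-- what changed: Replaces the bit-by-bit shift-and-add loop with a single direct multiplication reduced modulo 2**bitlen.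
-- outside the precondition, e.g. on iter_mult(1, 1, -1): A returns 0, B raises ValueError
import Mathlib
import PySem

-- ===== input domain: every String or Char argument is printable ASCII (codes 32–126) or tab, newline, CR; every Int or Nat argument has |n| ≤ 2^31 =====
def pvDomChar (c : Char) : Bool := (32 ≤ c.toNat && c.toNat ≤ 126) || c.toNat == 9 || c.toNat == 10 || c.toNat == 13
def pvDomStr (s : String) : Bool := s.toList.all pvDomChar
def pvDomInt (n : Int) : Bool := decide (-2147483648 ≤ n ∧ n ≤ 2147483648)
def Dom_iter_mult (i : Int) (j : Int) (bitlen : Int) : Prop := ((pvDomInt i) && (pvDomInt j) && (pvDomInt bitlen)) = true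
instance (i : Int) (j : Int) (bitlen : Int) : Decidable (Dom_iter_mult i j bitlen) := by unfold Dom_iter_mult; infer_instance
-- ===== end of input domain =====

-- B replaces A's per-bit shift-and-add loop by a single multiplication reduced mod 2**bitlen (faster).

-- ===== PORT A =====
-- literal port of A's loop: state (n, r), one step per bit in range(bitlen)
def iter_mult (i : Int) (j : Int) (bitlen : Int) : Int :=
  ((PySem.List.pyRange 0 bitlen 1).foldl
    (fun (st : Int × Int) (bit : Int) =>
      let r := if PySem.Int.band j ((1 : Int) <<< bit.toNat) ≠ 0
               then PySem.Int.mod (st.2 + st.1) ((2 : Int) ^ bitlen.toNat)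
               else st.2
      (PySem.Int.mod (st.1 + st.1) ((2 : Int) ^ bitlen.toNat), r))
    (i, 0)).2

-- ===== PORT B =====
def iter_mult_alt (i : Int) (j : Int) (bitlen : Int) : Int :=
  PySem.Int.mod (i * j) ((1 : Int) <<< bitlen.toNat)

-- ===== PRECONDITION & SPEC =====
-- Pre_ excludes bitlen < 0, where A's loop body never runs and A accidentally returns 0,
-- while B's `1 << bitlen` raises ValueError.
def Pre_iter_mult (i : Int) (j : Int) (bitlen : Int) : Prop := 0 ≤ bitlen
instance (i : Int) (j : Int) (bitlen : Int) : Decidable (Pre_iter_mult i j bitlen) := by unfold Pre_iter_mult; infer_instance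
def pvWitness_iter_mult : Int × Int × Int := (7, 11, 5)

def Spec_iter_mult (i : Int) (j : Int) (bitlen : Int) (out : Int) : Prop := out = iter_mult_alt i j bitlen
instance (i : Int) (j : Int) (bitlen : Int) (out : Int) : Decidable (Spec_iter_mult i j bitlen out) := by unfold Spec_iter_mult; infer_instance

-- ===== CLAIM (what is proved, stated in full; the proofs are below) =====
def Claim_equal_iter_mult : Prop := ∀ (i : Int) (j : Int) (bitlen : Int), Dom_iter_mult i j bitlen → Pre_iter_mult i j bitlen → Spec_iter_mult i j bitlen (iter_mult i j bitlen)

-- ===== LEMMAS AND PROOFS =====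

theorem pv_nat_and_two_pow (n k : Nat) : n &&& 2 ^ k = n / 2 ^ k % 2 * 2 ^ k := by
  rw [Nat.and_two_pow, Nat.testBit_eq_decide_div_mod_eq]
  rcases Nat.mod_two_eq_zero_or_one (n / 2 ^ k) with h | h <;> simp [h]

theorem pv_band_two_pow (j : Int) (k : Nat) :
    PySem.Int.band j (2 ^ k) = (j / (2 ^ k)) % 2 * 2 ^ k := by
  have hP : (0:Int) < 2 ^ k := by positivity
  have hPc : ((2:Int) ^ k) = ((2 ^ k : Nat) : Int) := by push_cast; ring
  have hPt : ((2:Int) ^ k).toNat = 2 ^ k := by rw [hPc, Int.toNat_natCast]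
  unfold PySem.Int.band
  rw [if_pos (le_of_lt hP)]
  by_cases hj : 0 ≤ j
  · rw [if_pos hj, hPt, pv_nat_and_two_pow]
    have hjj : j = (j.toNat : Int) := (Int.toNat_of_nonneg hj).symm
    rw [hjj]
    have e1 : ((j.toNat : Int)) / (2 ^ k) = ((j.toNat / 2 ^ k : Nat) : Int) := by
      rw [hPc]; norm_cast
    rw [e1]
    have e2 : ((j.toNat / 2 ^ k : Nat) : Int) % 2 = ((j.toNat / 2 ^ k % 2 : Nat) : Int) := by
      norm_cast
    rw [e2]
    simp
  · rw [if_neg hj, hPt, Nat.and_comm, pv_nat_and_two_pow]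
    set m : Nat := (-j - 1).toNat with hm
    have hjm : j = -(m : Int) - 1 := by
      have h0 : (0:Int) ≤ -j - 1 := by omega
      have := Int.toNat_of_nonneg h0
      omega
    have hdm : (2:Int)^k * ((m / 2^k : Nat) : Int) + ((m % 2^k : Nat):Int) = (m:Int) := by
      exact_mod_cast congrArg (Nat.cast : Nat → Int) (Nat.div_add_mod m (2^k))
    have hrlt : ((m % 2^k : Nat):Int) < 2^k := by
      rw [hPc]; exact_mod_cast Nat.mod_lt m (show 0 < 2^k by positivity)
    have hrge : (0:Int) ≤ ((m % 2^k : Nat):Int) := by positivity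
    have hq : j / (2 ^ k) = -((m / 2 ^ k : Nat) : Int) - 1 := by
      have := (Int.ediv_emod_unique (a := j) (b := 2^k)
        (q := -((m / 2^k : Nat) : Int) - 1) (r := 2^k - 1 - ((m % 2^k : Nat):Int)) hP).mpr
        ⟨by rw [hjm]; linarith [hdm], by omega, by omega⟩
      exact this.1
    rw [hq]
    rcases Nat.even_or_odd (m / 2 ^ k) with ⟨t, ht⟩ | ⟨t, ht⟩
    · have h : m / 2 ^ k % 2 = 0 := Nat.even_iff.mp ⟨t, ht⟩
      have he : (-((m / 2 ^ k : Nat) : Int) - 1) % 2 = 1 := by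
        rw [ht]; push_cast; omega
      rw [he, h]
      have hz : 2 ^ k - 0 * 2 ^ k = 2 ^ k := by simp
      rw [hz, one_mul]; exact hPc.symm
    · have h : m / 2 ^ k % 2 = 1 := Nat.odd_iff.mp ⟨t, ht⟩
      have he : (-((m / 2 ^ k : Nat) : Int) - 1) % 2 = 0 := by
        rw [ht]; push_cast; omega
      rw [he, h]
      simp

theorem pv_emod_step (j : Int) (k : Nat) :
    j % (2 ^ (k + 1)) = j % (2 ^ k) + (j / (2 ^ k)) % 2 * 2 ^ k := by
  have hP : (0:Int) < 2 ^ k := by positivity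
  have hP1 : (0:Int) < 2 ^ (k+1) := by positivity
  have hpow : (2:Int) ^ (k+1) = 2 * 2 ^ k := by ring
  have hj : j = 2 ^ k * (j / 2 ^ k) + j % 2 ^ k := (Int.ediv_add_emod j (2^k)).symm
  have hr0 : 0 ≤ j % 2 ^ k := Int.emod_nonneg j (ne_of_gt hP)
  have hr1 : j % 2 ^ k < 2 ^ k := Int.emod_lt_of_pos j hP
  set q := j / 2 ^ k with hqd
  have hq : q = 2 * (q / 2) + q % 2 := (Int.ediv_add_emod q 2).symm
  have he0 : 0 ≤ q % 2 := Int.emod_nonneg q (by norm_num)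
  have he1 : q % 2 < 2 := Int.emod_lt_of_pos q (by norm_num)
  have hmul : q % 2 * 2 ^ k ≤ 1 * 2 ^ k :=
    mul_le_mul_of_nonneg_right (by omega) (le_of_lt hP)
  have := (Int.ediv_emod_unique (a := j) (b := 2 ^ (k+1))
    (q := q / 2) (r := q % 2 * 2 ^ k + j % 2 ^ k) hP1).mpr
    ⟨by rw [hpow]; nlinarith [hj, hq], by nlinarith, by rw [hpow]; nlinarith⟩
  rw [this.2]; ring

theorem pv_loop (i j : Int) (B K : Nat) :
    (List.range K).foldl
      (fun (st : Int × Int) (k : Nat) =>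
        let r := if PySem.Int.band j ((1 : Int) <<< ((k : Int)).toNat) ≠ 0
                 then PySem.Int.mod (st.2 + st.1) ((2 : Int) ^ B)
                 else st.2
        (PySem.Int.mod (st.1 + st.1) ((2 : Int) ^ B), r))
      (i, 0)
    = ((if K = 0 then i else (i * 2 ^ K) % (2 ^ B)), (i * (j % (2 ^ K))) % (2 ^ B)) := by
  have hM : (0:Int) < 2 ^ B := by positivity
  have hmod : ∀ a : Int, PySem.Int.mod a ((2:Int) ^ B) = a % 2 ^ B := fun a =>
    PySem.Int.mod_eq_emod_of_pos hM
  induction K with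
  | zero => simp
  | succ K ih =>
      rw [List.range_succ, List.foldl_append]
      rw [ih]
      simp only [List.foldl_cons, List.foldl_nil]
      have hsh : ((1 : Int) <<< (((K : Nat) : Int)).toNat) = 2 ^ K := by
        simp [Int.shiftLeft_eq]
      rw [hsh, pv_band_two_pow, hmod, hmod]
      have hbit0 : 0 ≤ (j / (2 ^ K : Int)) % 2 := Int.emod_nonneg _ (by norm_num)
      have hbit1 : (j / (2 ^ K : Int)) % 2 < 2 := Int.emod_lt_of_pos _ (by norm_num)
      -- n-component: (n + n) % m = (i * 2^(K+1)) % m whether or not K = 0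
      have hn : ((if K = 0 then i else (i * 2 ^ K) % (2:Int) ^ B)
                  + (if K = 0 then i else (i * 2 ^ K) % (2:Int) ^ B)) % (2:Int) ^ B
              = (i * 2 ^ (K+1)) % (2:Int) ^ B := by
        by_cases hK : K = 0
        · subst hK; rw [if_pos rfl, show i * 2 ^ (0+1) = i + i from by ring]
        · rw [if_neg hK, Int.emod_add_emod, Int.add_emod_emod,
              show i * 2 ^ K + i * 2 ^ K = i * 2 ^ (K+1) from by ring]
      -- r-component helper: adding n is adding i*2^K modulo m
      have hradd : ((i * (j % (2 ^ K : Int))) % (2:Int) ^ B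
                  + (if K = 0 then i else (i * 2 ^ K) % (2:Int) ^ B)) % (2:Int) ^ B
              = (i * (j % (2 ^ K : Int)) + i * 2 ^ K) % (2:Int) ^ B := by
        by_cases hK : K = 0
        · subst hK; rw [if_pos rfl, Int.emod_add_emod,
              show i * ((j : Int) % 2 ^ 0) + i * 2 ^ 0 = i * ((j : Int) % 2 ^ 0) + i from by ring]
        · rw [if_neg hK, Int.emod_add_emod, Int.add_emod_emod]
      by_cases hb : (j / (2 ^ K : Int)) % 2 = 0
      · have hjstep : j % ((2:Int) ^ (K+1)) = j % ((2:Int) ^ K) := by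
          rw [pv_emod_step, hb]; ring
        rw [hb]
        have hcond : ¬ ((0:Int) * 2 ^ K ≠ 0) := by simp
        rw [if_neg hcond, hn, hjstep, if_neg (Nat.succ_ne_zero K)]
      · have hb1 : (j / (2 ^ K : Int)) % 2 = 1 := by omega
        have hjstep : j % ((2:Int) ^ (K+1)) = j % ((2:Int) ^ K) + 2 ^ K := by
          rw [pv_emod_step, hb1]; ring
        rw [hb1]
        have hcond : ((1:Int) * 2 ^ K ≠ 0) := by positivity
        rw [if_pos hcond, hn, hradd, hjstep, if_neg (Nat.succ_ne_zero K),
            show i * ((j : Int) % 2 ^ K + 2 ^ K) = i * ((j : Int) % 2 ^ K) + i * 2 ^ K from by ring]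

-- ===== VERDICT (by name: the statement is the Claim_ definition above) =====
theorem iter_mult_spec : Claim_equal_iter_mult := by
  intro i j bitlen _ hpre
  unfold Spec_iter_mult iter_mult iter_mult_alt
  set K := bitlen.toNat with hK
  have hM : (0:Int) < 2 ^ K := by positivity
  rw [PySem.List.pyRange_one, PySem.Int.mod_eq_emod_of_pos (by rw [Int.shiftLeft_eq]; positivity),
      Int.shiftLeft_eq, one_mul]
  have h0 : (bitlen - 0).toNat = K := by omega
  rw [h0, List.foldl_map]
  have hfold :
      List.foldl
        (fun (st : Int × Int) (k : Nat) =>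
          let r := if PySem.Int.band j ((1 : Int) <<< ((0 : Int) + (k : Int)).toNat) ≠ 0
                   then PySem.Int.mod (st.2 + st.1) ((2 : Int) ^ K)
                   else st.2
          (PySem.Int.mod (st.1 + st.1) ((2 : Int) ^ K), r))
        (i, 0) (List.range K)
      = List.foldl
        (fun (st : Int × Int) (k : Nat) =>
          let r := if PySem.Int.band j ((1 : Int) <<< (((k : Nat) : Int)).toNat) ≠ 0
                   then PySem.Int.mod (st.2 + st.1) ((2 : Int) ^ K)
                   else st.2
          (PySem.Int.mod (st.1 + st.1) ((2 : Int) ^ K), r))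
        (i, 0) (List.range K) := by
    congr 1
    funext st k
    simp
  rw [hfold, pv_loop]
  show i * (j % 2 ^ K) % 2 ^ K = i * j % 2 ^ K
  conv_lhs => rw [Int.mul_emod, Int.emod_emod_of_dvd _ (dvd_refl _), ← Int.mul_emod]
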